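-- pv_equiv track=rewrite | github.com/Shaun-Z/Pytorch-Unet-timeseries | data_add_noise/explore_sgcc_dataset.py | has_continuous_zeros
-- ===== SOURCE A (Python) =====
-- def has_continuous_zeros(row, threshold=30):
--     consecutive_zeros = 0
--     for value in row:
--         if value == 0:
--             consecutive_zeros += 1
--             if consecutive_zeros > threshold:
--                 return True
--         else:
--             consecutive_zeros = 0
--     return False
-- ===== SOURCE B (Python) =====
-- from itertools import groupby
--
-- def has_continuous_zeros(row, threshold=30):
--     for value, group in groupby(row):
--         if value == 0 and sum(1 for _ in group) > threshold:
--             return True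
--     return False
-- ===== Notes on version B (the rewrite author's own statement) =====
-- stated objective: idiomatic
-- what changed: Replaced the explicit counter-and-reset loop with itertools.groupby: the row is partitioned into maximal runs of equal values and the function checks whether some zero run has length exceeding the threshold.
import Mathlib
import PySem

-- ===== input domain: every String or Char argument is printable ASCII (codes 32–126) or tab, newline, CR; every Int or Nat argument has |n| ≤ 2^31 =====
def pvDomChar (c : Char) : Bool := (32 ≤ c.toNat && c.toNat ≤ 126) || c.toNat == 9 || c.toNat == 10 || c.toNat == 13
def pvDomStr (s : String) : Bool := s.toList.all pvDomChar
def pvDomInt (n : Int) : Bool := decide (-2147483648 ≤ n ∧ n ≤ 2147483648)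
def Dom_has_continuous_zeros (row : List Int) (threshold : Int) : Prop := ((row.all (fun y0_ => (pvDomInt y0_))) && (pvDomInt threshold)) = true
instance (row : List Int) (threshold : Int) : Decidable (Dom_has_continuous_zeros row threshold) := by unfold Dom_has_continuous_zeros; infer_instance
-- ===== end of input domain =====

-- B replaces A's counter-and-reset scan by grouping the row into maximal runs of
-- equal values (itertools.groupby) and testing each zero run's length; same cost.

-- ===== PORT A =====
-- the for-loop with early return, carrying the consecutive_zeros counter
def hczLoop (row : List Int) (threshold : Int) (consecutive_zeros : Int) : Bool :=
  match row with
  | [] => false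
  | value :: rest =>
    if value = 0 then
      if consecutive_zeros + 1 > threshold then true
      else hczLoop rest threshold (consecutive_zeros + 1)
    else hczLoop rest threshold 0

def has_continuous_zeros (row : List Int) (threshold : Int) : Bool :=
  hczLoop row threshold 0

-- ===== PORT B =====
-- groupby: take a maximal run of equal values, test it, continue after the run
def hczRuns (row : List Int) (threshold : Int) : Bool :=
  match row with
  | [] => false
  | value :: rest =>
    let runLen : Int := 1 + (rest.takeWhile (· = value)).length
    if value = 0 ∧ runLen > threshold then true
    else hczRuns (rest.dropWhile (· = value)) threshold
termination_by row.length
decreasing_by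
  have := List.length_dropWhile_le (· = value) rest
  simp only [List.length_cons]
  omega

def has_continuous_zeros_alt (row : List Int) (threshold : Int) : Bool :=
  hczRuns row threshold

-- ===== PRECONDITION & SPEC =====
def Spec_has_continuous_zeros (row : List Int) (threshold : Int) (out : Bool) : Prop := out = has_continuous_zeros_alt row threshold
instance (row : List Int) (threshold : Int) (out : Bool) : Decidable (Spec_has_continuous_zeros row threshold out) := by unfold Spec_has_continuous_zeros; infer_instance

-- ===== CLAIM (what is proved, stated in full; the proofs are below) =====
def Claim_equal_has_continuous_zeros : Prop := ∀ (row : List Int) (threshold : Int), Dom_has_continuous_zeros row threshold → Spec_has_continuous_zeros row threshold (has_continuous_zeros row threshold)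

-- ===== LEMMAS AND PROOFS =====

-- skipping one nonzero element does not change B's verdict
theorem hczRuns_cons_nonzero (v t : Int) (rest : List Int) (hv : v ≠ 0) :
    hczRuns (v :: rest) t = hczRuns rest t := by
  cases rest with
  | nil => simp [hczRuns, hv]
  | cons w rest2 =>
    by_cases hw : w = v
    · subst hw
      simp [hczRuns, hv]
    · have : (w :: rest2).dropWhile (· = v) = w :: rest2 := by
        simp [List.dropWhile, hw]
      simp [hczRuns, hv, this]

-- B's one-step characterisation through the leading zero run
theorem hczRuns_zero_run (t : Int) (row : List Int) :
    hczRuns row t =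
      ((decide (1 ≤ (row.takeWhile (· = (0:Int))).length) &&
        decide (((row.takeWhile (· = (0:Int))).length : Int) > t)) ||
       hczRuns (row.dropWhile (· = (0:Int))) t) := by
  cases row with
  | nil => simp [hczRuns]
  | cons v rest =>
    by_cases hv : v = 0
    · subst hv
      simp only [List.takeWhile, List.dropWhile, decide_true]
      by_cases ht : ((1:Int) + (rest.takeWhile (· = (0:Int))).length) > t
      · simp [hczRuns, ht]
        omega
      · simp [hczRuns, ht]
        omega
    · have ht : (v :: rest).takeWhile (· = (0:Int)) = [] := by
        simp [List.takeWhile, hv]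
      have hd : (v :: rest).dropWhile (· = (0:Int)) = v :: rest := by
        simp [List.dropWhile, hv]
      simp [ht, hd]

-- the loop with counter c agrees with B after accounting for the leading zero run
theorem hczLoop_eq (row : List Int) : ∀ (t c : Int),
    hczLoop row t c =
      ((decide (1 ≤ (row.takeWhile (· = (0:Int))).length) &&
        decide (c + ((row.takeWhile (· = (0:Int))).length : Int) > t)) ||
       hczRuns (row.dropWhile (· = (0:Int))) t) := by
  induction row with
  | nil => intro t c; simp [hczLoop, hczRuns]
  | cons v rest ih =>
    intro t c
    by_cases hv : v = 0
    · subst hv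
      simp only [List.takeWhile, List.dropWhile, decide_true]
      by_cases hc : c + 1 > t
      · have : hczLoop (0 :: rest) t c = true := by
          simp [hczLoop, hc]
        rw [this]
        have hlen : (0:Int) ≤ ((rest.takeWhile (· = (0:Int))).length : Int) :=
          Int.natCast_nonneg _
        simp only [List.length_cons]
        have hgt : c + ((rest.takeWhile (· = (0:Int))).length + 1 : Nat) > t := by
          push_cast
          omega
        symm
        simp only [Bool.or_eq_true, Bool.and_eq_true, decide_eq_true_eq]
        left
        refine ⟨by omega, ?_⟩
        push_cast at hgt ⊢
        omega
      · have hstep : hczLoop (0 :: rest) t c = hczLoop rest t (c + 1) := by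
          simp [hczLoop, hc]
        rw [hstep, ih t (c + 1)]
        simp only [List.length_cons]
        by_cases h1 : 1 ≤ (rest.takeWhile (· = (0:Int))).length
        · have : (c + 1 + ((rest.takeWhile (· = (0:Int))).length : Int) > t)
               ↔ (c + ((rest.takeWhile (· = (0:Int))).length + 1 : Nat) > t) := by
            push_cast; omega
          simp [h1, this]
        · have h0 : (rest.takeWhile (· = (0:Int))).length = 0 := by omega
          simp only [h0, Nat.cast_zero, Nat.cast_one, zero_add, add_zero]
          have e2 : ¬ (c + (1:Int) > t) := hc
          simp [e2]
    · have ht : (v :: rest).takeWhile (· = (0:Int)) = [] := by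
        simp [List.takeWhile, hv]
      have hd : (v :: rest).dropWhile (· = (0:Int)) = v :: rest := by
        simp [List.dropWhile, hv]
      have hstep : hczLoop (v :: rest) t c = hczLoop rest t 0 := by
        simp [hczLoop, hv]
      rw [hstep, ih t 0, ht, hd, hczRuns_cons_nonzero v t rest hv,
          hczRuns_zero_run t rest]
      simp

-- ===== VERDICT (by name: the statement is the Claim_ definition above) =====
theorem has_continuous_zeros_spec : Claim_equal_has_continuous_zeros := by
  intro row threshold _
  unfold Spec_has_continuous_zeros has_continuous_zeros has_continuous_zeros_alt
  rw [hczLoop_eq row threshold 0, hczRuns_zero_run threshold row]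
  simp
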